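-- pv_equiv track=rewrite | github.com/ZXXZ1000/LATRACE-AI | modules/memory/adk/memory_tools.py | _normalize_include
-- ===== SOURCE A (Python) =====
-- from typing import Any, Awaitable, Callable, Dict, Iterable, List, Optional, Tuple
--
-- _ENTITY_PROFILE_INCLUDE_ALLOWED = {"facts", "relations", "events", "quotes", "states"}
--
-- _ENTITY_PROFILE_INCLUDE_DEFAULT = ("facts", "relations", "events")
--
-- def _normalize_include(include: Optional[Iterable[str]]) -> Tuple[List[str], bool]:
--     if include is None:
--         return list(_ENTITY_PROFILE_INCLUDE_DEFAULT), False
--     out: List[str] = []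
--     invalid = False
--     for item in include:
--         val = str(item or "").strip().lower()
--         if not val:
--             continue
--         if val not in _ENTITY_PROFILE_INCLUDE_ALLOWED:
--             invalid = True
--             continue
--         if val not in out:
--             out.append(val)
--     if not out:
--         out = list(_ENTITY_PROFILE_INCLUDE_DEFAULT)
--     return out, invalid
-- ===== SOURCE B (Python) =====
-- from typing import Iterable, List, Optional, Tuple
--
-- _ENTITY_PROFILE_INCLUDE_ALLOWED = {"facts", "relations", "events", "quotes", "states"}
-- _ENTITY_PROFILE_INCLUDE_DEFAULT = ("facts", "relations", "events")
--
--
-- def _normalize_include(include: Optional[Iterable[str]]) -> Tuple[List[str], bool]: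
--     if include is None:
--         return list(_ENTITY_PROFILE_INCLUDE_DEFAULT), False
--     normalized = [str(i or "").strip().lower() for i in include]
--     invalid = any(v and v not in _ENTITY_PROFILE_INCLUDE_ALLOWED for v in normalized)
--     # Scan the fixed allowed vocabulary (not the input): pair each allowed value
--     # that occurs with its first-occurrence index, then order by that index.
--     firsts = [(normalized.index(v), v) for v in sorted(_ENTITY_PROFILE_INCLUDE_ALLOWED) if v in normalized]
--     firsts.sort(key=lambda t: t[0])
--     out = [v for _, v in firsts]
--     return (out or list(_ENTITY_PROFILE_INCLUDE_DEFAULT)), invalid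
-- ===== Notes on version B (the rewrite author's own statement) =====
-- stated objective: alternative
-- what changed: The dedup/order step no longer scans the input accumulating an output list: B scans the fixed allowed vocabulary, pairs each allowed value that occurs with its first-occurrence index in the normalized input, and sorts the present values by that index; the invalid flag comes from a separate any() pass.
import Mathlib
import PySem

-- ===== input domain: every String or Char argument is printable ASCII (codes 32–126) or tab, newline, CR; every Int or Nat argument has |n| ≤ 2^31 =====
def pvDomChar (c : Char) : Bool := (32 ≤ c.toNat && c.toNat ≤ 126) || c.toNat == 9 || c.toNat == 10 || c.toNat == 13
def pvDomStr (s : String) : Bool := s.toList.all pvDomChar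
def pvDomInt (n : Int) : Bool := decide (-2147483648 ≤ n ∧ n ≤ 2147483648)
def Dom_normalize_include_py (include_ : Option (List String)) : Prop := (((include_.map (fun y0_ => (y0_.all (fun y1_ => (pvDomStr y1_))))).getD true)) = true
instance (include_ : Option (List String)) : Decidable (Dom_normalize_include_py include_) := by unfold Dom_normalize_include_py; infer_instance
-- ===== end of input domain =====

-- B replaces A's fused accumulating dedup loop with a different algorithm: it scans the fixed
-- allowed vocabulary, pairs each allowed value that occurs with its first-occurrence index in
-- the normalized input, and sorts the present ones by that index; same observable result.
-- ===== PORT A =====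
def pvAllowed : List String := ["facts", "relations", "events", "quotes", "states"]
def pvDefault : List String := ["facts", "relations", "events"]
-- str(item or "").strip().lower(): for a str argument, `item or ""` is item itself when nonempty and "" otherwise, so the value is item.strip().lower() in both cases
def pvNorm (item : String) : String := PySem.Str.lower (PySem.Str.strip item)

-- A's step function, the body of A's for-loop, named
def pvStep (s : List String × Bool) (item : String) : List String × Bool :=
  let val := pvNorm item
  if val == "" then s
  else if !pvAllowed.contains val then (s.1, true)
  else if s.1.contains val then s
  else (s.1 ++ [val], s.2)

def normalize_include_py (include_ : Option (List String)) : List String × Bool :=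
  match include_ with
  | none => (pvDefault, false)
  | some xs =>
    let s := xs.foldl pvStep ([], false)
    (if s.1.isEmpty then pvDefault else s.1, s.2)

-- ===== PORT B =====
-- sorted(_ENTITY_PROFILE_INCLUDE_ALLOWED): the module-level set constant, sorted
def pvAllowedSorted : List String := ["events", "facts", "quotes", "relations", "states"]

def normalize_include_py_alt (include_ : Option (List String)) : List String × Bool :=
  match include_ with
  | none => (pvDefault, false)
  | some xs =>
    let normalized := xs.map pvNorm
    let invalid := normalized.any (fun v => !(v == "") && !pvAllowed.contains v)
    -- normalized.index(v): guarded by `if v in normalized`, so index? is always some; getD 0 is never the default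
    let firsts := (pvAllowedSorted.filter (fun v => normalized.contains v)).map
        (fun v => ((PySem.List.index? normalized v).getD 0, v))
    let sortedFirsts := PySem.List.sorted firsts (fun t => t.1) false
    let out := sortedFirsts.map (fun t => t.2)
    (if out.isEmpty then pvDefault else out, invalid)

-- ===== PRECONDITION & SPEC =====
def Spec_normalize_include_py (include_ : Option (List String)) (out : List String × Bool) : Prop := out = normalize_include_py_alt include_
instance (include_ : Option (List String)) (out : List String × Bool) : Decidable (Spec_normalize_include_py include_ out) := by unfold Spec_normalize_include_py; infer_instance

-- ===== CLAIM (what is proved, stated in full; the proofs are below) =====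
def Claim_equal_normalize_include_py : Prop := ∀ (include_ : Option (List String)), Dom_normalize_include_py include_ → Spec_normalize_include_py include_ (normalize_include_py include_)

-- ===== LEMMAS AND PROOFS =====

theorem pvStep_blank (x : String) (s : List String × Bool) (h : pvNorm x = "") :
    pvStep s x = s := by simp [pvStep, h]

theorem pvStep_bad (x : String) (s : List String × Bool) (hA : pvNorm x ∉ pvAllowed)
    (h0 : pvNorm x ≠ "") : pvStep s x = (s.1, true) := by simp [pvStep, h0, hA]

theorem pvStep_ok (x : String) (s : List String × Bool) (hA : pvNorm x ∈ pvAllowed) :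
    pvStep s x = (PySem.Set.add s.1 (pvNorm x), s.2) := by
  have h0 : pvNorm x ≠ "" := by rintro h; rw [h] at hA; revert hA; decide
  by_cases hm : s.1.contains (pvNorm x) <;>
    simp_all [pvStep, PySem.Set.add, PySem.Set.contains]

-- A's loop, from an arbitrary accumulator, is dedup-merge over the allowed normalized values paired with the any-scan
theorem pv_loop (xs : List String) (out : List String) (inv : Bool) :
    xs.foldl pvStep (out, inv)
    = ((xs.map pvNorm).filter (fun v => pvAllowed.contains v) |>.foldl PySem.Set.add out,
       inv || (xs.map pvNorm).any (fun v => !(v == "") && !pvAllowed.contains v)) := by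
  induction xs generalizing out inv with
  | nil => simp
  | cons x t ih =>
    rw [List.foldl_cons]
    by_cases hA : pvNorm x ∈ pvAllowed
    · rw [pvStep_ok x _ hA, ih]
      simp [hA]
    · by_cases h0 : pvNorm x = ""
      · rw [pvStep_blank x _ h0, ih]
        rw [h0] at hA
        simp [h0, hA]
      · rw [pvStep_bad x _ hA h0, ih]
        simp [h0, hA]

-- normalized.index(v) for v ∈ normalized is List.idxOf
theorem pv_index_getD (ns : List String) (v : String) (h : v ∈ ns) :
    (List.idxOf? v ns).getD 0 = List.idxOf v ns := by
  induction ns with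
  | nil => simp at h
  | cons x t ih =>
    by_cases hx : x = v
    · subst hx; simp [List.idxOf?_cons, List.idxOf_cons_self]
    · rw [List.idxOf_cons_ne _ (by exact hx)]
      have hv : v ∈ t := by simp [List.mem_cons] at h; tauto
      have hne : List.idxOf? v t ≠ none := by
        simp [ne_eq, List.idxOf?_eq_none_iff, hv]
      simp [List.idxOf?_cons, hx]
      cases hcase : List.idxOf? v t with
      | none => exact absurd hcase hne
      | some k => simp [← ih hv, hcase]

-- a Set.add fold from any accumulator s is s followed by the fresh part of the fold from []
theorem pv_foldl_add_acc (l : List String) (s : List String) :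
    l.foldl PySem.Set.add s
      = s ++ (l.foldl PySem.Set.add []).filter (fun y => !decide (y ∈ s)) := by
  induction l generalizing s with
  | nil => simp
  | cons a l ih =>
    rw [List.foldl_cons, ih (PySem.Set.add s a), List.foldl_cons,
        ih (PySem.Set.add [] a)]
    have hadd : PySem.Set.add ([] : List String) a = [a] := by simp [PySem.Set.add]
    rw [hadd]
    by_cases ha : a ∈ s
    · rw [PySem.Set.add_of_mem ha]
      simp only [List.filter_append, List.filter_filter, List.filter_cons]
      rw [if_neg (by simp [ha])]
      simp only [List.filter_nil, List.nil_append, List.append_cancel_left_eq]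
      refine List.filter_congr ?_
      intro y _
      by_cases hys : y ∈ s
      · simp [hys]
      · have hya : y ≠ a := fun h => hys (h ▸ ha)
        simp [hys, hya]
    · rw [PySem.Set.add_of_not_mem ha]
      simp only [List.filter_append, List.filter_filter, List.filter_cons]
      rw [if_pos (by simp [ha])]
      simp only [List.filter_nil, List.append_assoc, List.cons_append,
        List.nil_append, List.append_cancel_left_eq, List.cons.injEq, true_and]
      refine List.filter_congr ?_
      intro y _
      by_cases hys : y ∈ s <;> by_cases hya : y = a <;> simp [hys, hya]

-- pulling the head out of PySem's first-occurrence dedup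
theorem pv_dedup_cons (a : String) (l : List String) :
    PySem.List.dedup (a :: l)
      = a :: (PySem.List.dedup l).filter (fun y => !(y == a)) := by
  rw [PySem.List.dedup_eq_ofList, PySem.Set.ofList_eq_foldl, List.foldl_cons,
      pv_foldl_add_acc, ← PySem.Set.ofList_eq_foldl, ← PySem.List.dedup_eq_ofList]
  have hadd : PySem.Set.add ([] : List String) a = [a] := by simp [PySem.Set.add]
  rw [hadd, List.singleton_append]
  congr 1
  refine List.filter_congr ?_
  intro y _
  by_cases h : y = a <;> simp [h]

-- dedup of a filtered list is strictly increasing in first-occurrence index of the base list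
theorem pv_dedup_pairwise (p : String → Bool) (ns : List String) :
    (PySem.List.dedup (ns.filter p)).Pairwise
      (fun a b => List.idxOf a ns < List.idxOf b ns) := by
  induction ns with
  | nil => simp [PySem.List.dedup]
  | cons x ns ih =>
    by_cases hp : p x
    · rw [List.filter_cons_of_pos hp, pv_dedup_cons]
      refine List.Pairwise.cons ?_ ?_
      · intro a ha
        have hax : a ≠ x := by
          have := List.of_mem_filter ha; simp_all
        rw [List.idxOf_cons_self, List.idxOf_cons_ne _ (fun h => hax h.symm)]
        omega
      · refine ((ih.sublist List.filter_sublist).imp_of_mem ?_)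
        intro a b ha hb hab
        have hax : a ≠ x := by have := List.of_mem_filter ha; simp_all
        have hbx : b ≠ x := by have := List.of_mem_filter hb; simp_all
        rw [List.idxOf_cons_ne _ (fun h => hax h.symm),
            List.idxOf_cons_ne _ (fun h => hbx h.symm)]
        omega
    · rw [List.filter_cons_of_neg hp]
      refine ih.imp_of_mem ?_
      intro a b ha hb hab
      have hax : a ≠ x := by
        have hap : p a := by
          have := (PySem.List.mem_dedup (ns.filter p) a).mp ha
          exact List.of_mem_filter this
        intro h; rw [h] at hap; exact absurd hap (by simp [hp])
      have hbx : b ≠ x := by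
        have hbp : p b := by
          have := (PySem.List.mem_dedup (ns.filter p) b).mp hb
          exact List.of_mem_filter this
        intro h; rw [h] at hbp; exact absurd hbp (by simp [hp])
      rw [List.idxOf_cons_ne _ (fun h => hax h.symm),
          List.idxOf_cons_ne _ (fun h => hbx h.symm)]
      omega

theorem pv_mem_allowedSorted_iff (v : String) : v ∈ pvAllowedSorted ↔ v ∈ pvAllowed := by
  simp [pvAllowedSorted, pvAllowed]; tauto

-- the vocabulary scan is a permutation of the first-occurrence dedup of the allowed values
theorem pv_perm (ns : List String) :
    (PySem.List.dedup (ns.filter (fun v => pvAllowed.contains v))).Perm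
      (pvAllowedSorted.filter (fun v => ns.contains v)) := by
  refine (List.perm_ext_iff_of_nodup (PySem.List.nodup_dedup _)
    ((by decide : pvAllowedSorted.Nodup).filter _)).mpr ?_
  intro a
  rw [PySem.List.mem_dedup, List.mem_filter, List.mem_filter,
      pv_mem_allowedSorted_iff]
  simp [and_comm]

-- B's sorted vocabulary scan equals A's first-occurrence dedup
theorem pv_sorted_eq (ns : List String) :
    (PySem.List.sorted
        ((pvAllowedSorted.filter (fun v => ns.contains v)).map
          (fun v => ((PySem.List.index? ns v).getD 0, v)))
        (fun t => t.1) false).map (fun t => t.2)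
      = PySem.List.dedup (ns.filter (fun v => pvAllowed.contains v)) := by
  have hmapeq :
      (pvAllowedSorted.filter (fun v => ns.contains v)).map
          (fun v => ((PySem.List.index? ns v).getD 0, v))
        = (pvAllowedSorted.filter (fun v => ns.contains v)).map
          (fun v => (List.idxOf v ns, v)) := by
    refine List.map_congr_left ?_
    intro v hv
    have hvn : v ∈ ns := by
      have := (List.mem_filter.mp hv).2; simpa using this
    rw [PySem.List.index?_eq_idxOf?, pv_index_getD ns v hvn]
  rw [hmapeq]
  have hsorted :
      PySem.List.sorted
          ((pvAllowedSorted.filter (fun v => ns.contains v)).map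
            (fun v => (List.idxOf v ns, v)))
          (fun t => t.1) false
        = (PySem.List.dedup (ns.filter (fun v => pvAllowed.contains v))).map
            (fun v => (List.idxOf v ns, v)) := by
    refine PySem.List.sorted_eq_of_perm_of_pairwise_lt _ _ (fun t : Nat × String => t.1) ?_ ?_
    · exact (pv_perm ns).map _
    · rw [List.pairwise_map]
      exact pv_dedup_pairwise _ ns
  rw [hsorted, List.map_map]
  simp [Function.comp_def]

-- ===== VERDICT (by name: the statement is the Claim_ definition above) =====
theorem normalize_include_py_spec : Claim_equal_normalize_include_py := by
  intro include_ _
  unfold Spec_normalize_include_py normalize_include_py normalize_include_py_alt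
  cases include_ with
  | none => rfl
  | some xs =>
    simp only [pv_loop, pv_sorted_eq, PySem.Set.ofList_eq_foldl,
      PySem.List.dedup_eq_ofList, Bool.false_or]
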